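-- pv_equiv track=rewrite | github.com/pypi-data/pypi-mirror-279 | packages/p-vs-np-library/p_vs_np_library-0.1-py3-none-any.whl/p_vs_np/database_problems/context_free_programmed_language_membership.py | is_string_member
-- ===== SOURCE A (Python) =====
-- def is_string_member(grammar, start_symbol, input_string):
--     # Create a table to store the parsing results for substrings of the input string
--     table = [[set() for _ in range(len(input_string))] for _ in range(len(input_string))]
--
--     # Perform the CYK algorithm to fill in the parsing table
--     for length in range(1, len(input_string) + 1):
--         for i in range(len(input_string) - length + 1):
--             j = i + length - 1
--             for k in range(i, j):
--                 for production in grammar: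
--                     for rule in grammar[production]:
--                         if len(rule) == 2:
--                             left, right = rule
--                             if table[i][k] and table[k + 1][j] and right in table[i][k] and left in table[k + 1][j]:
--                                 table[i][j].add(production)
--
--             for production in grammar:
--                 for rule in grammar[production]:
--                     if len(rule) == 1 and rule == input_string[i: j + 1]:
--                         table[i][j].add(production)
--
--     # Check if the start symbol is present in the parsing results for the entire input string
--     return start_symbol in table[0][len(input_string) - 1]
-- ===== SOURCE B (Python) =====
-- def is_string_member(grammar, start_symbol, input_string):
--     n = len(input_string)
--     # Index the grammar once: terminal rules by their character, binary rules
--     # keyed by (second symbol, first symbol) -- the order the original checks them in.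
--     term = {}
--     pair = {}
--     for production, rules in grammar.items():
--         for rule in rules:
--             if len(rule) == 1:
--                 term.setdefault(rule, set()).add(production)
--             elif len(rule) == 2:
--                 pair.setdefault((rule[1], rule[0]), set()).add(production)
--     memo = {}
--
--     def cell(i, j):
--         if (i, j) in memo:
--             return memo[(i, j)]
--         result = set()
--         if i == j:
--             result |= term.get(input_string[i], set())
--         else:
--             for k in range(i, j):
--                 for a in cell(i, k):
--                     for b in cell(k + 1, j):
--                         result |= pair.get((a, b), set())
--         memo[(i, j)] = result
--         return result
--
--     return start_symbol in cell(0, n - 1)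
-- ===== Notes on version B (the rewrite author's own statement) =====
-- stated objective: faster
-- what changed: B indexes the grammar once (terminal rules by their string, binary rules keyed by the symbol pair the original tests) and computes table cells by memoized top-down recursion iterating only over symbols actually present in the sub-cells, instead of rescanning the whole grammar for every (i, j, k) triple.
import Mathlib
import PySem

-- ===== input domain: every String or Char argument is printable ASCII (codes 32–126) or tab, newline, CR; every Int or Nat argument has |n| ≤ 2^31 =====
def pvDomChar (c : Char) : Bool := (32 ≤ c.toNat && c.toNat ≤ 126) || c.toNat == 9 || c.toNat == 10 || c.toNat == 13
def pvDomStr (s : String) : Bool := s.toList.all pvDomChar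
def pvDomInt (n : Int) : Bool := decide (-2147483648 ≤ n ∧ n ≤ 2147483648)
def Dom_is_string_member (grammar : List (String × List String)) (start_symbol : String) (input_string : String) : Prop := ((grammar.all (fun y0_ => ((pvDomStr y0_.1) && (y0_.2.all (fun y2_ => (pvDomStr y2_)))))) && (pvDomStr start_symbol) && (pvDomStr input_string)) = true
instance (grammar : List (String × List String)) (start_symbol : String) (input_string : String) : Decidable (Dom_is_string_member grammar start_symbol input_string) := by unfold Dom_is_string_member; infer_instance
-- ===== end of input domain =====

-- B re-implements A's CYK-style membership test: the grammar is indexed ONCE (terminal rules by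
-- their string, binary rules by the symbol pair A checks them against) and the table cells are
-- computed by memoized top-down recursion over only the symbols actually present in the sub-cells,
-- instead of re-scanning the whole grammar for every (i, j, k) triple.

-- ===== PORT A =====
-- table[i][j] — Python list indexing (the loop indices here are always ≥ 0)
def pvTget (t : List (List (PySem.Set String))) (i j : Int) : PySem.Set String :=
  PySem.List.pyGetD (PySem.List.pyGetD t i []) j PySem.Set.empty

-- table[i][j].add(production) — in-place update of cell (i, j); the loop indices are ≥ 0,
-- where Python's list indexing coincides with .toNat indexing
def pvTadd (t : List (List (PySem.Set String))) (i j : Int) (p : String) :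
    List (List (PySem.Set String)) :=
  t.modify i.toNat (fun row => row.modify j.toNat (fun c => PySem.Set.add c p))

-- 'table[i][k] and table[k+1][j] and right in table[i][k] and left in table[k+1][j]'
-- (a non-empty set is truthy)
def pvBinCond (t : List (List (PySem.Set String))) (i k j : Int) (l r : Char) : Bool :=
  !(pvTget t i k).isEmpty && !(pvTget t (k + 1) j).isEmpty &&
    PySem.Set.contains (pvTget t i k) (String.ofList [r]) &&
    PySem.Set.contains (pvTget t (k + 1) j) (String.ofList [l])

-- 'for production in grammar: for rule in grammar[production]:' over the dict's items;
-- 'if len(rule) == 2: left, right = rule; if …: table[i][j].add(production)'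
def pvBinFold (gi : List (String × List String)) (i k j : Int)
    (t : List (List (PySem.Set String))) : List (List (PySem.Set String)) :=
  gi.foldl (fun t pr =>
    pr.2.foldl (fun t rule =>
      match rule.toList with
      | [l, r] => if pvBinCond t i k j l r then pvTadd t i j pr.1 else t
      | _ => t) t) t

-- 'for k in range(i, j):'
def pvKFold (gi : List (String × List String)) (i j : Int)
    (t : List (List (PySem.Set String))) : List (List (PySem.Set String)) :=
  (PySem.List.pyRange i j 1).foldl (fun t k => pvBinFold gi i k j t) t

-- 'if len(rule) == 1 and rule == input_string[i : j + 1]: table[i][j].add(production)'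
def pvTermFold (gi : List (String × List String)) (input_string : String) (i j : Int)
    (t : List (List (PySem.Set String))) : List (List (PySem.Set String)) :=
  gi.foldl (fun t pr =>
    pr.2.foldl (fun t rule =>
      if PySem.Str.len rule == 1 && rule == PySem.Str.slice input_string (some i) (some (j + 1))
      then pvTadd t i j pr.1 else t) t) t

-- the body of 'for i in range(len(input_string) - length + 1):' — 'j = i + length - 1'
def pvBody (gi : List (String × List String)) (input_string : String) (length i : Int)
    (t : List (List (PySem.Set String))) : List (List (PySem.Set String)) :=
  pvTermFold gi input_string i (i + length - 1) (pvKFold gi i (i + length - 1) t)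

def is_string_member (grammar : List (String × List String)) (start_symbol : String) (input_string : String) : Bool :=
  -- the grammar parameter is a Python dict: iteration with lookup is iteration over its items
  let gi := (PySem.Dict.ofList grammar).items
  let n : Int := PySem.Str.len input_string
  -- table = [[set() for _ in range(len(input_string))] for _ in range(len(input_string))]
  let table0 : List (List (PySem.Set String)) :=
    (PySem.List.pyRange 0 n 1).map (fun _ =>
      (PySem.List.pyRange 0 n 1).map (fun _ => (PySem.Set.empty : PySem.Set String)))
  -- for length in range(1, len(input_string) + 1): for i in range(len(input_string) - length + 1): …
  let table := (PySem.List.pyRange 1 (n + 1) 1).foldl (fun t length =>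
    (PySem.List.pyRange 0 (n - length + 1) 1).foldl (fun t i =>
      pvBody gi input_string length i t) t) table0
  -- return start_symbol in table[0][len(input_string) - 1]
  PySem.Set.contains (pvTget table 0 (n - 1)) start_symbol

-- ===== PORT B =====
-- the one-time grammar index: terminal rules keyed by the rule string, binary rules keyed by
-- (rule[1], rule[0]) — the pair the original checks the sub-cells against
def pvIdx (gi : List (String × List String)) :
    PySem.Dict String (PySem.Set String) × PySem.Dict (String × String) (PySem.Set String) :=
  gi.foldl (fun tp pr =>
    pr.2.foldl (fun tp rule =>
      match rule.toList with
      | [_] => (tp.1.modify rule PySem.Set.empty (fun s => PySem.Set.add s pr.1), tp.2)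
      | [l, r] =>
          (tp.1, tp.2.modify (String.ofList [r], String.ofList [l]) PySem.Set.empty
            (fun s => PySem.Set.add s pr.1))
      | _ => tp) tp) (PySem.Dict.empty, PySem.Dict.empty)

-- cell(i, j) — Source B's memoized recursion ported as plain recursion (the memo is pure caching);
-- the Nat fuel (j - i).toNat only makes the recursion structural, it never cuts a call short;
-- input_string[i] is only evaluated at in-range i, the pyGetD default is never the value used
def pvCellGo (term : PySem.Dict String (PySem.Set String))
    (pair : PySem.Dict (String × String) (PySem.Set String))
    (s : List Char) : Nat → Int → Int → PySem.Set String
  | 0, i, j =>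
    if i = j then
      term.getD (String.ofList [PySem.List.pyGetD s i (Char.ofNat 0)]) PySem.Set.empty
    else PySem.Set.empty   -- fuel 0 means j ≤ i: 'for k in range(i, j)' is the empty loop
  | f + 1, i, j =>
    if i = j then
      term.getD (String.ofList [PySem.List.pyGetD s i (Char.ofNat 0)]) PySem.Set.empty
    else
      (PySem.List.pyRange i j 1).foldl (fun acc k =>
        (pvCellGo term pair s f i k).foldl (fun acc a =>
          (pvCellGo term pair s f (k + 1) j).foldl (fun acc b =>
            PySem.Set.union acc (pair.getD (a, b) PySem.Set.empty)) acc) acc)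
        PySem.Set.empty

def pvCell (term : PySem.Dict String (PySem.Set String))
    (pair : PySem.Dict (String × String) (PySem.Set String))
    (s : List Char) (i j : Int) : PySem.Set String :=
  pvCellGo term pair s (j - i).toNat i j

def is_string_member_alt (grammar : List (String × List String)) (start_symbol : String) (input_string : String) : Bool :=
  let gi := (PySem.Dict.ofList grammar).items   -- grammar.items()
  let idx := pvIdx gi
  PySem.Set.contains
    (pvCell idx.1 idx.2 input_string.toList 0 (PySem.Str.len input_string - 1)) start_symbol

-- ===== PRECONDITION & SPEC =====
-- Pre_ excludes only the empty input string, on which A raises IndexError (table[0][-1] on an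
-- empty table); B returns False there.
def Pre_is_string_member (grammar : List (String × List String)) (start_symbol : String) (input_string : String) : Prop :=
  input_string ≠ ""
instance (grammar : List (String × List String)) (start_symbol : String) (input_string : String) : Decidable (Pre_is_string_member grammar start_symbol input_string) := by unfold Pre_is_string_member; infer_instance

def pvWitness_is_string_member : (List (String × List String)) × String × String :=
  ([("S", ["AB", "a"]), ("A", ["a"]), ("B", ["b"])], "S", "ab")

def Spec_is_string_member (grammar : List (String × List String)) (start_symbol : String) (input_string : String) (out : Bool) : Prop := out = is_string_member_alt grammar start_symbol input_string
instance (grammar : List (String × List String)) (start_symbol : String) (input_string : String) (out : Bool) : Decidable (Spec_is_string_member grammar start_symbol input_string out) := by unfold Spec_is_string_member; infer_instance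

-- ===== CLAIM (what is proved, stated in full; the proofs are below) =====
def Claim_equal_is_string_member : Prop := ∀ (grammar : List (String × List String)) (start_symbol : String) (input_string : String), Dom_is_string_member grammar start_symbol input_string → Pre_is_string_member grammar start_symbol input_string → Spec_is_string_member grammar start_symbol input_string (is_string_member grammar start_symbol input_string)

-- ===== LEMMAS AND PROOFS =====

-- generic or-shaped fold lemma with a preserved invariant R
theorem pv_foldl_or {α β : Type} (P : β → Prop) (Q : α → Prop) (F : β → α → β) (R : β → Prop)
    (l : List α) (init : β) (hinit : R init)
    (hR : ∀ acc x, x ∈ l → R acc → R (F acc x))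
    (h : ∀ acc x, x ∈ l → R acc → (P (F acc x) ↔ P acc ∨ Q x)) :
    R (l.foldl F init) ∧ (P (l.foldl F init) ↔ P init ∨ ∃ x ∈ l, Q x) := by
  induction l generalizing init with
  | nil => simpa using hinit
  | cons x xs ih =>
    simp only [List.foldl_cons]
    obtain ⟨hr, hp⟩ := ih (F init x) (hR init x (by simp) hinit)
      (fun acc y hy => hR acc y (by simp [hy]))
      (fun acc y hy => h acc y (by simp [hy]))
    refine ⟨hr, ?_⟩
    rw [hp, h init x (by simp) hinit]
    simp only [List.mem_cons]
    constructor
    · rintro ((hPi | hQx) | ⟨y, hy, hQy⟩)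
      · exact Or.inl hPi
      · exact Or.inr ⟨x, Or.inl rfl, hQx⟩
      · exact Or.inr ⟨y, Or.inr hy, hQy⟩
    · rintro (hPi | ⟨y, (rfl | hy), hQy⟩)
      · exact Or.inl (Or.inl hPi)
      · exact Or.inl (Or.inr hQy)
      · exact Or.inr ⟨y, hy, hQy⟩

-- simple variant (no state invariant needed)
theorem pv_foldl_or' {α β : Type} (P : β → Prop) (Q : α → Prop) (F : β → α → β)
    (l : List α) (init : β)
    (h : ∀ acc x, x ∈ l → (P (F acc x) ↔ P acc ∨ Q x)) :
    P (l.foldl F init) ↔ P init ∨ ∃ x ∈ l, Q x :=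
  (pv_foldl_or P Q F (fun _ => True) l init trivial (fun _ _ _ _ => trivial)
    (fun acc x hx _ => h acc x hx)).2

-- membership predicates extracted from the grammar
def pvTermQ (gi : List (String × List String)) (w p : String) : Prop :=
  ∃ pr ∈ gi, ∃ rule ∈ pr.2, rule = w ∧ rule.toList.length = 1 ∧ p = pr.1

def pvPairQ (gi : List (String × List String)) (a b p : String) : Prop :=
  ∃ pr ∈ gi, ∃ rule ∈ pr.2, ∃ l r : Char,
    rule.toList = [l, r] ∧ a = String.ofList [r] ∧ b = String.ofList [l] ∧ p = pr.1

theorem pvIdx_term_mem (gi : List (String × List String)) (w p : String) :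
    p ∈ (pvIdx gi).1.getD w PySem.Set.empty ↔ pvTermQ gi w p := by
  unfold pvIdx pvTermQ
  refine ((pv_foldl_or' (fun tp : PySem.Dict String (PySem.Set String) × PySem.Dict (String × String) (PySem.Set String) => p ∈ tp.1.getD w PySem.Set.empty)
    (fun pr : String × List String => ∃ rule ∈ pr.2, rule = w ∧ rule.toList.length = 1 ∧ p = pr.1)
    _ _ _ ?_).trans (by simp [PySem.Dict.getD_empty]))
  intro acc pr _
  refine ((pv_foldl_or' (fun tp : PySem.Dict String (PySem.Set String) × PySem.Dict (String × String) (PySem.Set String) => p ∈ tp.1.getD w PySem.Set.empty)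
    (fun rule : String => rule = w ∧ rule.toList.length = 1 ∧ p = pr.1)
    _ _ _ ?_).trans (by rfl))
  intro acc2 rule _
  rcases h : rule.toList with _ | ⟨c, _ | ⟨r, _ | _⟩⟩
  · simp [h]
  · -- terminal rule: term.setdefault(rule, set()).add(production)
    simp only [h, List.length_cons, List.length_nil]
    rw [PySem.Dict.getD_modify]
    split_ifs with hw
    · simp [PySem.Set.mem_add, hw]
    · simp; intro h'; exact absurd h'.symm hw
  · -- binary rule: only the pair index changes
    simp [h]
  · simp [h]

theorem pvIdx_pair_mem (gi : List (String × List String)) (a b p : String) :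
    p ∈ (pvIdx gi).2.getD (a, b) PySem.Set.empty ↔ pvPairQ gi a b p := by
  unfold pvIdx pvPairQ
  refine ((pv_foldl_or' (fun tp : PySem.Dict String (PySem.Set String) × PySem.Dict (String × String) (PySem.Set String) => p ∈ tp.2.getD (a, b) PySem.Set.empty)
    (fun pr : String × List String => ∃ rule ∈ pr.2, ∃ l r : Char,
      rule.toList = [l, r] ∧ a = String.ofList [r] ∧ b = String.ofList [l] ∧ p = pr.1)
    _ _ _ ?_).trans (by simp [PySem.Dict.getD_empty]))
  intro acc pr _
  refine ((pv_foldl_or' (fun tp : PySem.Dict String (PySem.Set String) × PySem.Dict (String × String) (PySem.Set String) => p ∈ tp.2.getD (a, b) PySem.Set.empty)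
    (fun rule : String => ∃ l r : Char,
      rule.toList = [l, r] ∧ a = String.ofList [r] ∧ b = String.ofList [l] ∧ p = pr.1)
    _ _ _ ?_).trans (by rfl))
  intro acc2 rule _
  rcases h : rule.toList with _ | ⟨l, _ | ⟨r, _ | _⟩⟩
  · simp [h]
  · simp [h]
  · simp only [h]
    rw [PySem.Dict.getD_modify]
    split_ifs with hw
    · rw [Prod.mk.injEq] at hw
      simp [PySem.Set.mem_add, hw.1, hw.2]
    · simp
      intro ha hb
      exact absurd (by rw [Prod.mk.injEq]; exact ⟨ha, hb⟩) hw
  · simp [h]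

-- B's cell equation, membership form
theorem pvCellGo_mem (term : PySem.Dict String (PySem.Set String))
    (pair : PySem.Dict (String × String) (PySem.Set String)) (s : List Char) :
    ∀ (f : Nat) (i j : Int), (j - i).toNat ≤ f → ∀ p : String,
      (p ∈ pvCellGo term pair s f i j ↔
        (if i = j then
          p ∈ term.getD (String.ofList [PySem.List.pyGetD s i (Char.ofNat 0)]) PySem.Set.empty
        else ∃ k : Int, i ≤ k ∧ k < j ∧ ∃ a ∈ pvCell term pair s i k,
          ∃ b ∈ pvCell term pair s (k + 1) j, p ∈ pair.getD (a, b) PySem.Set.empty)) := by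
  intro f
  induction f using Nat.strong_induction_on with
  | _ f ih =>
    intro i j hle p
    match f with
    | 0 =>
      simp only [pvCellGo]
      split_ifs with h
      · exact Iff.rfl
      · constructor
        · intro hmem; simp [PySem.Set.empty] at hmem
        · rintro ⟨k, hik, hkj, -⟩; omega
    | f + 1 =>
      simp only [pvCellGo]
      split_ifs with h
      · exact Iff.rfl
      · have hstep : ∀ (acc : PySem.Set String) (k : Int), k ∈ PySem.List.pyRange i j 1 →
            (p ∈ (pvCellGo term pair s f i k).foldl (fun acc a =>
              (pvCellGo term pair s f (k + 1) j).foldl (fun acc b =>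
                PySem.Set.union acc (pair.getD (a, b) PySem.Set.empty)) acc) acc ↔
              p ∈ acc ∨ ∃ a ∈ pvCell term pair s i k,
                ∃ b ∈ pvCell term pair s (k + 1) j, p ∈ pair.getD (a, b) PySem.Set.empty) := by
          intro acc k hk
          have hkb := PySem.List.mem_pyRange_one.mp hk
          have hik : (k - i).toNat ≤ f := by omega
          have hkj : (j - (k + 1)).toNat ≤ f := by omega
          have hcellL : ∀ a : String,
              a ∈ pvCellGo term pair s f i k ↔ a ∈ pvCell term pair s i k := fun a =>
            (ih f (by omega) i k hik a).trans
              (ih (k - i).toNat (by omega) i k (le_refl _) a).symm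
          have hcellR : ∀ b : String,
              b ∈ pvCellGo term pair s f (k + 1) j ↔ b ∈ pvCell term pair s (k + 1) j := fun b =>
            (ih f (by omega) (k + 1) j hkj b).trans
              (ih (j - (k + 1)).toNat (by omega) (k + 1) j (le_refl _) b).symm
          have hinner : ∀ (acc2 : PySem.Set String) (a : String),
              a ∈ pvCellGo term pair s f i k →
              (p ∈ (pvCellGo term pair s f (k + 1) j).foldl (fun acc b =>
                PySem.Set.union acc (pair.getD (a, b) PySem.Set.empty)) acc2 ↔
                p ∈ acc2 ∨ ∃ b ∈ pvCell term pair s (k + 1) j,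
                  p ∈ pair.getD (a, b) PySem.Set.empty) := by
            intro acc2 a _
            refine ((pv_foldl_or' (fun acc : PySem.Set String => p ∈ acc)
              (fun b : String => p ∈ pair.getD (a, b) PySem.Set.empty) _ _ _
              (fun acc3 b _ => PySem.Set.mem_union acc3 _ p)).trans ?_)
            constructor
            · rintro (hmem | ⟨b, hb, hq⟩)
              · exact Or.inl hmem
              · exact Or.inr ⟨b, (hcellR b).mp hb, hq⟩
            · rintro (hmem | ⟨b, hb, hq⟩)
              · exact Or.inl hmem
              · exact Or.inr ⟨b, (hcellR b).mpr hb, hq⟩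
          refine ((pv_foldl_or' (fun acc : PySem.Set String => p ∈ acc)
            (fun a : String => ∃ b ∈ pvCell term pair s (k + 1) j,
              p ∈ pair.getD (a, b) PySem.Set.empty) _ _ _ hinner).trans ?_)
          constructor
          · rintro (hmem | ⟨a, ha, hq⟩)
            · exact Or.inl hmem
            · exact Or.inr ⟨a, (hcellL a).mp ha, hq⟩
          · rintro (hmem | ⟨a, ha, hq⟩)
            · exact Or.inl hmem
            · exact Or.inr ⟨a, (hcellL a).mpr ha, hq⟩
        refine ((pv_foldl_or' (fun acc : PySem.Set String => p ∈ acc)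
          (fun k : Int => ∃ a ∈ pvCell term pair s i k,
            ∃ b ∈ pvCell term pair s (k + 1) j, p ∈ pair.getD (a, b) PySem.Set.empty)
          _ _ _ hstep).trans ?_)
        constructor
        · rintro (hmem | ⟨k, hk, hq⟩)
          · simp [PySem.Set.empty] at hmem
          · have := PySem.List.mem_pyRange_one.mp hk
            exact ⟨k, this.1, this.2, hq⟩
        · rintro ⟨k, hik, hkj, hq⟩
          exact Or.inr ⟨k, PySem.List.mem_pyRange_one.mpr ⟨hik, hkj⟩, hq⟩

theorem pvCell_mem (term : PySem.Dict String (PySem.Set String))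
    (pair : PySem.Dict (String × String) (PySem.Set String))
    (s : List Char) (i j : Int) (p : String) :
    p ∈ pvCell term pair s i j ↔
      (if i = j then
        p ∈ term.getD (String.ofList [PySem.List.pyGetD s i (Char.ofNat 0)]) PySem.Set.empty
      else ∃ k : Int, i ≤ k ∧ k < j ∧ ∃ a ∈ pvCell term pair s i k,
        ∃ b ∈ pvCell term pair s (k + 1) j, p ∈ pair.getD (a, b) PySem.Set.empty) :=
  pvCellGo_mem term pair s (j - i).toNat i j (le_refl _) p

-- ---------- A-side table infrastructure ----------

-- Nat-indexed view of the table
def pvG (t : List (List (PySem.Set String))) (i j : Nat) : PySem.Set String :=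
  (t.getD i []).getD j PySem.Set.empty

theorem pvTget_eq (t : List (List (PySem.Set String))) {i j : Int}
    (hi : 0 ≤ i) (hj : 0 ≤ j) : pvTget t i j = pvG t i.toNat j.toNat := by
  unfold pvTget pvG
  rw [show i = ((i.toNat : Nat) : Int) by omega, show j = ((j.toNat : Nat) : Int) by omega,
    PySem.List.pyGetD_natCast, PySem.List.pyGetD_natCast]
  simp only [Int.toNat_natCast]

def pvShape (n : Nat) (t : List (List (PySem.Set String))) : Prop :=
  t.length = n ∧ ∀ row ∈ t, row.length = n

theorem pvShape_tadd (n : Nat) (t : List (List (PySem.Set String))) (i j : Int) (p : String)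
    (h : pvShape n t) : pvShape n (pvTadd t i j p) := by
  obtain ⟨hlen, hrows⟩ := h
  refine ⟨by simpa [pvTadd] using hlen, ?_⟩
  intro row hrow
  rw [List.mem_iff_getElem] at hrow
  obtain ⟨m, hm, hrow⟩ := hrow
  have hm' : m < t.length := by simpa [pvTadd] using hm
  subst hrow
  unfold pvTadd
  rw [List.getElem_modify]
  split_ifs
  · rw [List.length_modify]; exact hrows _ (List.getElem_mem hm')
  · exact hrows _ (List.getElem_mem hm')

theorem pvG_tadd_ne (t : List (List (PySem.Set String))) (i j : Int) (p : String) (i' j' : Nat)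
    (h : ¬(i' = i.toNat ∧ j' = j.toNat)) :
    pvG (pvTadd t i j p) i' j' = pvG t i' j' := by
  unfold pvG pvTadd
  by_cases hii : i.toNat = i'
  · have hjj : ¬(j.toNat = j') := by
      intro hc; exact h ⟨hii.symm, hc.symm⟩
    rcases ht : t[i']? with _ | row
    · simp [List.getD_eq_getElem?_getD, List.getElem?_modify, ht]
    · simp [List.getD_eq_getElem?_getD, List.getElem?_modify, ht, hii,
        List.getElem?_modify, hjj]
  · simp [List.getD_eq_getElem?_getD, List.getElem?_modify, hii]

theorem pvG_tadd_self (n : Nat) (t : List (List (PySem.Set String))) (i j : Int) (p : String)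
    (hsh : pvShape n t) (hi : i.toNat < n) (hj : j.toNat < n) :
    pvG (pvTadd t i j p) i.toNat j.toNat = PySem.Set.add (pvG t i.toNat j.toNat) p := by
  obtain ⟨hlen, hrows⟩ := hsh
  unfold pvG pvTadd
  have hi' : i.toNat < t.length := by omega
  have hrl : j.toNat < t[i.toNat].length := by
    rw [hrows _ (List.getElem_mem hi')]; exact hj
  simp [List.getD_eq_getElem?_getD, List.getElem?_modify, List.getElem?_eq_getElem hi',
    List.getElem?_eq_getElem hrl]

theorem pvBinCond_congr (t t' : List (List (PySem.Set String))) (i k j : Int)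
    (h1 : pvTget t' i k = pvTget t i k) (h2 : pvTget t' (k + 1) j = pvTget t (k + 1) j)
    (l r : Char) : pvBinCond t' i k j l r = pvBinCond t i k j l r := by
  unfold pvBinCond; rw [h1, h2]

-- what the inner grammar scan of A adds at (i, j) for a split point k, relative to table t0
def pvBinQ (gi : List (String × List String)) (t0 : List (List (PySem.Set String)))
    (i k j : Int) (p : String) : Prop :=
  ∃ pr ∈ gi, ∃ rule ∈ pr.2, ∃ l r : Char,
    rule.toList = [l, r] ∧ pvBinCond t0 i k j l r = true ∧ p = pr.1

-- what A's terminal scan adds at (i, j)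
def pvTermQA (gi : List (String × List String)) (input_string : String) (i j : Int)
    (p : String) : Prop :=
  ∃ pr ∈ gi, ∃ rule ∈ pr.2,
    (PySem.Str.len rule == 1 &&
      rule == PySem.Str.slice input_string (some i) (some (j + 1))) = true ∧ p = pr.1

-- the fold state invariant: shape kept, every cell other than (i, j) untouched
def pvFrame (n : Nat) (t0 t : List (List (PySem.Set String))) (i j : Int) : Prop :=
  pvShape n t ∧ ∀ i' j' : Nat, ¬(i' = i.toNat ∧ j' = j.toNat) → pvG t i' j' = pvG t0 i' j'

theorem pvFrame_refl (n : Nat) (t : List (List (PySem.Set String))) (i j : Int)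
    (h : pvShape n t) : pvFrame n t t i j := ⟨h, fun _ _ _ => rfl⟩

theorem pvFrame_tadd (n : Nat) (t0 t : List (List (PySem.Set String))) (i j : Int) (p : String)
    (h : pvFrame n t0 t i j) : pvFrame n t0 (pvTadd t i j p) i j := by
  refine ⟨pvShape_tadd n t i j p h.1, fun i' j' hne => ?_⟩
  rw [pvG_tadd_ne t i j p i' j' hne]
  exact h.2 i' j' hne

-- the two sub-cells a split at k reads are never the written cell (i, j)
theorem pvFrame_tget (n : Nat) (t0 t : List (List (PySem.Set String))) (i k j : Int)
    (h : pvFrame n t0 t i j) (h0 : 0 ≤ i) (hik : i ≤ k) (hkj : k < j) :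
    pvTget t i k = pvTget t0 i k ∧ pvTget t (k + 1) j = pvTget t0 (k + 1) j := by
  constructor
  · rw [pvTget_eq t h0 (by omega), pvTget_eq t0 h0 (by omega)]
    exact h.2 _ _ (by intro hc; omega)
  · rw [pvTget_eq t (by omega) (by omega), pvTget_eq t0 (by omega) (by omega)]
    exact h.2 _ _ (by intro hc; omega)

-- fold lemma specialised to table-updating loops: frame kept, cell (i, j) grows by Q
theorem pv_foldl_frame_or {α : Type} (F : List (List (PySem.Set String)) → α → List (List (PySem.Set String)))
    (n : Nat) (t0 : List (List (PySem.Set String))) (i j : Int) (Q : α → String → Prop)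
    (l : List α) (t : List (List (PySem.Set String)))
    (hstep : ∀ acc x, x ∈ l → pvFrame n t0 acc i j →
      pvFrame n t0 (F acc x) i j ∧
      ∀ p : String, (p ∈ pvG (F acc x) i.toNat j.toNat ↔ p ∈ pvG acc i.toNat j.toNat ∨ Q x p))
    (hfr : pvFrame n t0 t i j) :
    pvFrame n t0 (l.foldl F t) i j ∧
    ∀ p : String, (p ∈ pvG (l.foldl F t) i.toNat j.toNat ↔
      p ∈ pvG t i.toNat j.toNat ∨ ∃ x ∈ l, Q x p) := by
  induction l generalizing t with
  | nil => simpa using hfr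
  | cons x xs ih =>
    simp only [List.foldl_cons]
    obtain ⟨hfr1, hmem1⟩ := hstep t x (by simp) hfr
    obtain ⟨hfr2, hmem2⟩ := ih (F t x) (fun acc y hy => hstep acc y (by simp [hy])) hfr1
    refine ⟨hfr2, fun p => ?_⟩
    rw [hmem2 p, hmem1 p]
    simp only [List.mem_cons]
    constructor
    · rintro ((hp | hq) | ⟨y, hy, hq⟩)
      · exact Or.inl hp
      · exact Or.inr ⟨x, Or.inl rfl, hq⟩
      · exact Or.inr ⟨y, Or.inr hy, hq⟩
    · rintro (hp | ⟨y, (rfl | hy), hq⟩)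
      · exact Or.inl (Or.inl hp)
      · exact Or.inl (Or.inr hq)
      · exact Or.inr ⟨y, hy, hq⟩

theorem pvBinFold_spec (gi : List (String × List String)) (n : Nat)
    (t0 t : List (List (PySem.Set String))) (i k j : Int)
    (h0 : 0 ≤ i) (hik : i ≤ k) (hkj : k < j) (hjn : j.toNat < n)
    (hfr : pvFrame n t0 t i j) :
    pvFrame n t0 (pvBinFold gi i k j t) i j ∧
    ∀ p : String, (p ∈ pvG (pvBinFold gi i k j t) i.toNat j.toNat ↔
      p ∈ pvG t i.toNat j.toNat ∨ pvBinQ gi t0 i k j p) := by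
  have hin : i.toNat < n := by omega
  unfold pvBinFold
  have hmain := pv_foldl_frame_or
    (fun t pr => pr.2.foldl (fun t rule =>
      match rule.toList with
      | [l, r] => if pvBinCond t i k j l r then pvTadd t i j pr.1 else t
      | _ => t) t) n t0 i j
    (fun pr p => ∃ rule ∈ pr.2, ∃ l r : Char,
      rule.toList = [l, r] ∧ pvBinCond t0 i k j l r = true ∧ p = pr.1) gi t ?_ hfr
  · refine ⟨hmain.1, fun p => (hmain.2 p).trans ?_⟩
    unfold pvBinQ
    exact Iff.rfl
  · intro acc pr _ hacc
    have hrule := pv_foldl_frame_or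
      (fun t rule =>
        match rule.toList with
        | [l, r] => if pvBinCond t i k j l r then pvTadd t i j pr.1 else t
        | _ => t) n t0 i j
      (fun rule p => ∃ l r : Char,
        rule.toList = [l, r] ∧ pvBinCond t0 i k j l r = true ∧ p = pr.1) pr.2 acc ?_ hacc
    · exact hrule
    · intro acc2 rule _ hacc2
      have hcond : ∀ l r : Char, pvBinCond acc2 i k j l r = pvBinCond t0 i k j l r := by
        intro l r
        have hg := pvFrame_tget n t0 acc2 i k j hacc2 h0 hik hkj
        exact pvBinCond_congr t0 acc2 i k j hg.1 hg.2 l r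
      rcases h : rule.toList with _ | ⟨l, _ | ⟨r, _ | _⟩⟩
      · simp only [h]
        exact ⟨hacc2, fun p => by simp [h]⟩
      · simp only [h]
        exact ⟨hacc2, fun p => by simp [h]⟩
      · simp only [h]
        rw [hcond l r]
        split_ifs with hb
        · refine ⟨pvFrame_tadd n t0 acc2 i j pr.1 hacc2, fun p => ?_⟩
          rw [pvG_tadd_self n acc2 i j pr.1 hacc2.1 hin hjn]
          rw [PySem.Set.mem_add]
          constructor
          · rintro (hp | rfl)
            · exact Or.inl hp
            · exact Or.inr ⟨l, r, rfl, hb, rfl⟩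
          · rintro (hp | ⟨l', r', heq, hb', rfl⟩)
            · exact Or.inl hp
            · exact Or.inr rfl
        · refine ⟨hacc2, fun p => ?_⟩
          constructor
          · exact Or.inl
          · rintro (hp | ⟨l', r', heq, hb', rfl⟩)
            · exact hp
            · obtain ⟨rfl, rfl⟩ : l' = l ∧ r' = r := by
                simpa using heq.symm
              exact absurd hb' hb
      · simp only [h]
        exact ⟨hacc2, fun p => by simp [h]⟩

theorem pvKFold_spec (gi : List (String × List String)) (n : Nat)
    (t : List (List (PySem.Set String))) (i j : Int)
    (h0 : 0 ≤ i) (hjn : j.toNat < n) (hsh : pvShape n t) :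
    pvFrame n t (pvKFold gi i j t) i j ∧
    ∀ p : String, (p ∈ pvG (pvKFold gi i j t) i.toNat j.toNat ↔
      p ∈ pvG t i.toNat j.toNat ∨ ∃ k ∈ PySem.List.pyRange i j 1, pvBinQ gi t i k j p) := by
  unfold pvKFold
  exact pv_foldl_frame_or (fun t k => pvBinFold gi i k j t) n t i j
    (fun k p => pvBinQ gi t i k j p) (PySem.List.pyRange i j 1) t
    (fun acc k hk hacc =>
      have hkb := PySem.List.mem_pyRange_one.mp hk
      pvBinFold_spec gi n t acc i k j h0 hkb.1 hkb.2 hjn hacc)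
    (pvFrame_refl n t i j hsh)

theorem pvTermFold_spec (gi : List (String × List String)) (input_string : String) (n : Nat)
    (t0 t : List (List (PySem.Set String))) (i j : Int)
    (h0 : 0 ≤ i) (hij : i ≤ j) (hjn : j.toNat < n) (hfr : pvFrame n t0 t i j) :
    pvFrame n t0 (pvTermFold gi input_string i j t) i j ∧
    ∀ p : String, (p ∈ pvG (pvTermFold gi input_string i j t) i.toNat j.toNat ↔
      p ∈ pvG t i.toNat j.toNat ∨ pvTermQA gi input_string i j p) := by
  have hin : i.toNat < n := by omega
  unfold pvTermFold
  have hmain := pv_foldl_frame_or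
    (fun t pr => pr.2.foldl (fun t rule =>
      if PySem.Str.len rule == 1 && rule == PySem.Str.slice input_string (some i) (some (j + 1))
      then pvTadd t i j pr.1 else t) t) n t0 i j
    (fun pr p => ∃ rule ∈ pr.2,
      (PySem.Str.len rule == 1 &&
        rule == PySem.Str.slice input_string (some i) (some (j + 1))) = true ∧ p = pr.1) gi t ?_ hfr
  · exact ⟨hmain.1, fun p => (hmain.2 p).trans (by unfold pvTermQA; exact Iff.rfl)⟩
  · intro acc pr _ hacc
    refine pv_foldl_frame_or _ n t0 i j
      (fun rule p =>
        (PySem.Str.len rule == 1 &&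
          rule == PySem.Str.slice input_string (some i) (some (j + 1))) = true ∧ p = pr.1)
      pr.2 acc ?_ hacc
    intro acc2 rule _ hacc2
    split_ifs with hb
    · refine ⟨pvFrame_tadd n t0 acc2 i j pr.1 hacc2, fun p => ?_⟩
      rw [pvG_tadd_self n acc2 i j pr.1 hacc2.1 hin hjn]
      rw [PySem.Set.mem_add]
      constructor
      · rintro (hp | rfl)
        · exact Or.inl hp
        · exact Or.inr ⟨hb, rfl⟩
      · rintro (hp | ⟨_, rfl⟩)
        · exact Or.inl hp
        · exact Or.inr rfl
    · refine ⟨hacc2, fun p => ?_⟩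
      constructor
      · exact Or.inl
      · rintro (hp | ⟨hb', rfl⟩)
        · exact hp
        · exact absurd hb' hb

theorem pvBody_spec (gi : List (String × List String)) (input_string : String) (n : Nat)
    (t : List (List (PySem.Set String))) (len i : Int)
    (h1 : 1 ≤ len) (h0 : 0 ≤ i) (hjn : (i + len - 1).toNat < n) (hsh : pvShape n t) :
    pvFrame n t (pvBody gi input_string len i t) i (i + len - 1) ∧
    ∀ p : String, (p ∈ pvG (pvBody gi input_string len i t) i.toNat (i + len - 1).toNat ↔
      p ∈ pvG t i.toNat (i + len - 1).toNat ∨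
        ((∃ k ∈ PySem.List.pyRange i (i + len - 1) 1, pvBinQ gi t i k (i + len - 1) p) ∨
          pvTermQA gi input_string i (i + len - 1) p)) := by
  unfold pvBody
  obtain ⟨hfr1, hmem1⟩ := pvKFold_spec gi n t i (i + len - 1) h0 hjn hsh
  obtain ⟨hfr2, hmem2⟩ := pvTermFold_spec gi input_string n t
    (pvKFold gi i (i + len - 1) t) i (i + len - 1) h0 (by omega) hjn hfr1
  refine ⟨hfr2, fun p => ?_⟩
  rw [hmem2 p, hmem1 p, or_assoc]

-- what A adds at (i, j) is exactly B's cell, once the smaller sub-cells agree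
theorem pvBridge (gi : List (String × List String)) (input_string : String)
    (t : List (List (PySem.Set String))) (i j : Int)
    (h0 : 0 ≤ i) (hij : i ≤ j) (hjn : j < (input_string.toList.length : Int))
    (hsub : ∀ i' j' : Int, 0 ≤ i' → i' ≤ j' → j' < (input_string.toList.length : Int) →
      j' - i' < j - i → ∀ q : String,
      (q ∈ pvG t i'.toNat j'.toNat ↔
        q ∈ pvCell (pvIdx gi).1 (pvIdx gi).2 input_string.toList i' j'))
    (p : String) :
    ((∃ k ∈ PySem.List.pyRange i j 1, pvBinQ gi t i k j p) ∨ pvTermQA gi input_string i j p) ↔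
    p ∈ pvCell (pvIdx gi).1 (pvIdx gi).2 input_string.toList i j := by
  rw [pvCell_mem]
  by_cases hij' : i = j
  · subst hij'
    rw [if_pos rfl]
    rw [PySem.List.pyRange_one_eq_nil (le_refl i)]
    simp only [List.not_mem_nil, false_and, exists_false, exists_const, false_or]
    have hi_lt : i.toNat < input_string.toList.length := by omega
    have hsget : PySem.List.pyGetD input_string.toList i (Char.ofNat 0) =
        input_string.toList[i.toNat] :=
      PySem.List.pyGetD_eq_getElem _ _ h0 (by omega)
    have hslice : PySem.Str.slice input_string (some i) (some (i + 1)) =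
        String.ofList [input_string.toList[i.toNat]] := by
      rw [← String.toList_inj, PySem.Str.toList_slice, String.toList_ofList]
      rw [show PySem.Chars.slice input_string.toList (some i) (some (i + 1)) =
        PySem.List.slice input_string.toList (some i) (some (i + 1)) from rfl]
      rw [PySem.List.slice_toNat _ h0 (by omega), show (i + 1).toNat - i.toNat = 1 by omega]
      rw [List.drop_eq_getElem_cons hi_lt, List.take_succ_cons, List.take_zero]
    rw [hsget, pvIdx_term_mem]
    unfold pvTermQA pvTermQ
    constructor
    · rintro ⟨pr, hpr, rule, hrule, hcond, rfl⟩
      rw [Bool.and_eq_true, beq_iff_eq, beq_iff_eq] at hcond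
      obtain ⟨hlen1, hruleeq⟩ := hcond
      rw [hslice] at hruleeq
      exact ⟨pr, hpr, rule, hrule, hruleeq, by rw [hruleeq, String.toList_ofList]; rfl, rfl⟩
    · rintro ⟨pr, hpr, rule, hrule, hruleeq, hlen1, rfl⟩
      refine ⟨pr, hpr, rule, hrule, ?_, rfl⟩
      rw [Bool.and_eq_true, beq_iff_eq, beq_iff_eq, hslice]
      refine ⟨?_, hruleeq⟩
      rw [PySem.Str.len_eq, hlen1]
      rfl
  · rw [if_neg hij']
    have hlt : i < j := lt_of_le_of_ne hij hij'
    have hterm : ¬ pvTermQA gi input_string i j p := by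
      rintro ⟨pr, _, rule, _, hcond, _⟩
      rw [Bool.and_eq_true, beq_iff_eq, beq_iff_eq] at hcond
      obtain ⟨hlen1, hruleeq⟩ := hcond
      rw [hruleeq, PySem.Str.len_eq, PySem.Str.toList_slice] at hlen1
      rw [show PySem.Chars.slice input_string.toList (some i) (some (j + 1)) =
        PySem.List.slice input_string.toList (some i) (some (j + 1)) from rfl] at hlen1
      rw [PySem.List.slice_toNat _ h0 (by omega)] at hlen1
      simp only [List.length_take, List.length_drop] at hlen1
      omega
    simp only [hterm, or_false]
    constructor
    · rintro ⟨k, hk, pr, hpr, rule, hrule, l, r, htl, hcond, rfl⟩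
      have hkb := PySem.List.mem_pyRange_one.mp hk
      unfold pvBinCond at hcond
      rw [Bool.and_eq_true, Bool.and_eq_true, Bool.and_eq_true] at hcond
      obtain ⟨⟨⟨-, -⟩, hcr⟩, hcl⟩ := hcond
      rw [PySem.Set.contains_iff, pvTget_eq t h0 (by omega)] at hcr
      rw [PySem.Set.contains_iff, pvTget_eq t (by omega) (by omega)] at hcl
      have ha := (hsub i k h0 hkb.1 (by omega) (by omega) _).mp hcr
      have hb := (hsub (k + 1) j (by omega) (by omega) hjn (by omega) _).mp hcl
      exact ⟨k, hkb.1, hkb.2, String.ofList [r], ha, String.ofList [l], hb,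
        (pvIdx_pair_mem gi _ _ _).mpr ⟨pr, hpr, rule, hrule, l, r, htl, rfl, rfl, rfl⟩⟩
    · rintro ⟨k, hik, hkj, a, ha, b, hb, hpair⟩
      obtain ⟨pr, hpr, rule, hrule, l, r, htl, rfl, rfl, rfl⟩ :=
        (pvIdx_pair_mem gi a b p).mp hpair
      refine ⟨k, PySem.List.mem_pyRange_one.mpr ⟨hik, hkj⟩,
        pr, hpr, rule, hrule, l, r, htl, ?_, rfl⟩
      have ha' := (hsub i k h0 hik (by omega) (by omega) _).mpr ha
      have hb' := (hsub (k + 1) j (by omega) (by omega) hjn (by omega) _).mpr hb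
      unfold pvBinCond
      rw [Bool.and_eq_true, Bool.and_eq_true, Bool.and_eq_true]
      rw [pvTget_eq t h0 (by omega), pvTget_eq t (by omega) (by omega)]
      refine ⟨⟨⟨?_, ?_⟩, ?_⟩, ?_⟩
      · simp only [Bool.not_eq_eq_eq_not, Bool.not_true, List.isEmpty_eq_false_iff]
        exact List.ne_nil_of_mem ha'
      · simp only [Bool.not_eq_eq_eq_not, Bool.not_true, List.isEmpty_eq_false_iff]
        exact List.ne_nil_of_mem hb'
      · exact (PySem.Set.contains_iff _ _).mpr ha'
      · exact (PySem.Set.contains_iff _ _).mpr hb'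

-- loop invariant: spans < ℓ (and spans = ℓ with start < m, already processed) agree with B's
-- cells; every other cell is still empty
def pvMid (gi : List (String × List String)) (input_string : String) (ℓ m : Nat)
    (t : List (List (PySem.Set String))) : Prop :=
  pvShape input_string.toList.length t ∧
  ∀ i j : Nat, i ≤ j → j < input_string.toList.length →
    ((j + 1 - i < ℓ ∨ (j + 1 - i = ℓ ∧ i < m)) →
      ∀ p : String, (p ∈ pvG t i j ↔
        p ∈ pvCell (pvIdx gi).1 (pvIdx gi).2 input_string.toList (i : Int) (j : Int))) ∧
    ((ℓ < j + 1 - i ∨ (j + 1 - i = ℓ ∧ m ≤ i)) → pvG t i j = PySem.Set.empty)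

theorem pvMid_step (gi : List (String × List String)) (input_string : String) (ℓ m : Nat)
    (t : List (List (PySem.Set String)))
    (hl : 1 ≤ ℓ) (hmn : m + ℓ ≤ input_string.toList.length)
    (h : pvMid gi input_string ℓ m t) :
    pvMid gi input_string ℓ (m + 1) (pvBody gi input_string (ℓ : Int) (m : Int) t) := by
  obtain ⟨hsh, h2⟩ := h
  have hjn : ((m : Int) + (ℓ : Int) - 1).toNat < input_string.toList.length := by omega
  obtain ⟨hfr, hmem⟩ := pvBody_spec gi input_string input_string.toList.length t
    (ℓ : Int) (m : Int) (by omega) (by omega) hjn hsh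
  have htn : ((m : Int)).toNat = m := by omega
  have hjn' : ((m : Int) + (ℓ : Int) - 1).toNat = m + ℓ - 1 := by omega
  refine ⟨hfr.1, fun i j hij hjlt => ⟨?_, ?_⟩⟩
  · intro hcase p
    by_cases hc : i = m ∧ j = m + ℓ - 1
    · obtain ⟨hi', hj'⟩ := hc
      rw [hi', hj']
      rw [show ((m + ℓ - 1 : Nat) : Int) = (m : Int) + (ℓ : Int) - 1 by omega]
      have hold : pvG t m (m + ℓ - 1) = PySem.Set.empty :=
        (h2 m (m + ℓ - 1) (by omega) (by omega)).2 (Or.inr ⟨by omega, le_refl m⟩)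
      have hmem' := hmem p
      rw [htn, hjn'] at hmem'
      have hbr := pvBridge gi input_string t (m : Int) ((m : Int) + (ℓ : Int) - 1)
        (by omega) (by omega) (by push_cast; omega)
        (fun i' j' h0' hij' hjn'' hspan q => by
          have hiff := (h2 i'.toNat j'.toNat (by omega) (by omega)).1
            (Or.inl (by omega)) q
          rw [hiff]
          rw [show ((i'.toNat : Nat) : Int) = i' by omega, show ((j'.toNat : Nat) : Int) = j' by omega])
        p
      rw [hmem', hold, ← hbr]
      simp [PySem.Set.empty]
    · have hne : ¬(i = ((m : Int)).toNat ∧ j = ((m : Int) + (ℓ : Int) - 1).toNat) := by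
        rw [htn, hjn']; exact hc
      rw [hfr.2 i j hne]
      apply (h2 i j hij hjlt).1
      rcases hcase with hlt | ⟨hsp, him⟩
      · exact Or.inl hlt
      · right
        refine ⟨hsp, ?_⟩
        rcases Nat.lt_succ_iff_lt_or_eq.mp him with him' | rfl
        · exact him'
        · exact absurd ⟨rfl, by omega⟩ hc
  · intro hcase
    have hne : ¬(i = ((m : Int)).toNat ∧ j = ((m : Int) + (ℓ : Int) - 1).toNat) := by
      rw [htn, hjn']
      rintro ⟨rfl, rfl⟩
      rcases hcase with hlt | ⟨_, hmi⟩
      · omega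
      · omega
    rw [hfr.2 i j hne]
    apply (h2 i j hij hjlt).2
    rcases hcase with hlt | ⟨hsp, hmi⟩
    · exact Or.inl hlt
    · exact Or.inr ⟨hsp, by omega⟩

theorem pvMid_ifold (gi : List (String × List String)) (input_string : String) (ℓ : Nat)
    (t : List (List (PySem.Set String)))
    (hl : 1 ≤ ℓ) (hln : ℓ ≤ input_string.toList.length)
    (h : pvMid gi input_string ℓ 0 t) :
    pvMid gi input_string ℓ (input_string.toList.length - ℓ + 1)
      ((PySem.List.pyRange 0 ((input_string.toList.length : Int) - (ℓ : Int) + 1) 1).foldl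
        (fun t i => pvBody gi input_string (ℓ : Int) i t) t) := by
  rw [show (input_string.toList.length : Int) - (ℓ : Int) + 1 =
    ((input_string.toList.length - ℓ + 1 : Nat) : Int) by omega]
  rw [PySem.List.pyRange_zero_nat, List.foldl_map]
  suffices h' : ∀ M : Nat, M ≤ input_string.toList.length - ℓ + 1 →
      pvMid gi input_string ℓ M
        ((List.range M).foldl (fun acc (k : Nat) => pvBody gi input_string (ℓ : Int) (k : Int) acc) t) by
    exact h' _ (le_refl _)
  intro M
  induction M with
  | zero => intro _; simpa using h
  | succ M ih =>
    intro hM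
    rw [List.range_succ, List.foldl_append, List.foldl_cons, List.foldl_nil]
    exact pvMid_step gi input_string ℓ M _ hl (by omega) (ih (by omega))

theorem pvMid_shift (gi : List (String × List String)) (input_string : String) (ℓ : Nat)
    (t : List (List (PySem.Set String)))
    (hl : 1 ≤ ℓ) (hln : ℓ ≤ input_string.toList.length)
    (h : pvMid gi input_string ℓ (input_string.toList.length - ℓ + 1) t) :
    pvMid gi input_string (ℓ + 1) 0 t := by
  obtain ⟨hsh, h2⟩ := h
  refine ⟨hsh, fun i j hij hjn => ⟨?_, ?_⟩⟩
  · intro hcase p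
    apply (h2 i j hij hjn).1
    rcases hcase with hlt | ⟨_, hi0⟩
    · rcases Nat.lt_succ_iff_lt_or_eq.mp hlt with hlt' | hsp
      · exact Or.inl hlt'
      · exact Or.inr ⟨hsp, by omega⟩
    · omega
  · intro hcase
    apply (h2 i j hij hjn).2
    left
    omega

theorem pvG_map_empty (A B : List Int) (i j : Nat) :
    pvG (A.map (fun _ => B.map (fun _ => (PySem.Set.empty : PySem.Set String)))) i j =
      PySem.Set.empty := by
  unfold pvG
  rcases hA : A[i]? with _ | a
  · simp only [List.getD_eq_getElem?_getD, List.getElem?_map, hA, Option.map_none,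
      Option.getD_none]
    simp
  · simp only [List.getD_eq_getElem?_getD, List.getElem?_map, hA, Option.map_some,
      Option.getD_some]
    rcases hB : B[j]? with _ | b
    · simp [hB, PySem.Set.empty]
    · simp [hB, PySem.Set.empty]

theorem pvMid_init (gi : List (String × List String)) (input_string : String) :
    pvMid gi input_string 1 0
      ((PySem.List.pyRange 0 ((input_string.toList.length : Nat) : Int) 1).map (fun _ =>
        (PySem.List.pyRange 0 ((input_string.toList.length : Nat) : Int) 1).map
          (fun _ => (PySem.Set.empty : PySem.Set String)))) := by
  refine ⟨⟨?_, ?_⟩, fun i j hij hjn => ⟨?_, ?_⟩⟩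
  · rw [List.length_map, PySem.List.length_pyRange_one]; omega
  · intro row hrow
    rw [List.mem_map] at hrow
    obtain ⟨_, _, rfl⟩ := hrow
    rw [List.length_map, PySem.List.length_pyRange_one]; omega
  · intro hcase
    rcases hcase with hlt | ⟨_, hi0⟩ <;> omega
  · intro _
    exact pvG_map_empty _ _ i j

theorem pvMid_final (gi : List (String × List String)) (input_string : String)
    (t0 : List (List (PySem.Set String))) (h : pvMid gi input_string 1 0 t0) :
    pvMid gi input_string (input_string.toList.length + 1) 0
      ((PySem.List.pyRange 1 ((input_string.toList.length : Int) + 1) 1).foldl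
        (fun t length =>
          (PySem.List.pyRange 0 ((input_string.toList.length : Int) - length + 1) 1).foldl
            (fun t i => pvBody gi input_string length i t) t) t0) := by
  rw [PySem.List.pyRange_one, show ((input_string.toList.length : Int) + 1 - 1).toNat =
    input_string.toList.length by omega, List.foldl_map]
  suffices h' : ∀ M : Nat, M ≤ input_string.toList.length →
      pvMid gi input_string (M + 1) 0
        ((List.range M).foldl (fun acc (k : Nat) =>
          (PySem.List.pyRange 0 ((input_string.toList.length : Int) - (1 + (k : Int)) + 1) 1).foldl
            (fun t i => pvBody gi input_string (1 + (k : Int)) i t) acc) t0) by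
    exact h' _ (le_refl _)
  intro M
  induction M with
  | zero => intro _; simpa using h
  | succ M ih =>
    intro hM
    rw [List.range_succ, List.foldl_append, List.foldl_cons, List.foldl_nil]
    have hcast : (1 : Int) + (M : Int) = ((M + 1 : Nat) : Int) := by omega
    simp only [hcast]
    exact pvMid_shift gi input_string (M + 1) _ (by omega) (by omega)
      (pvMid_ifold gi input_string (M + 1) _ (by omega) (by omega) (ih (by omega)))

-- ===== VERDICT (by name: the statement is the Claim_ definition above) =====
theorem is_string_member_spec : Claim_equal_is_string_member := by
  intro grammar start_symbol input_string hdom hpre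
  unfold Spec_is_string_member
  simp only [is_string_member, is_string_member_alt, PySem.Str.len_eq]
  have hn1 : 1 ≤ input_string.toList.length := by
    have : input_string.toList ≠ [] := by
      simpa [String.toList_eq_nil_iff] using hpre
    have := List.length_pos_of_ne_nil this
    omega
  have hmid := pvMid_final (PySem.Dict.ofList grammar).items input_string _
    (pvMid_init (PySem.Dict.ofList grammar).items input_string)
  have hcell := (hmid.2 0 (input_string.toList.length - 1) (by omega) (by omega)).1
    (Or.inl (by omega)) start_symbol
  rw [pvTget_eq _ (by omega) (by omega)]
  rw [show ((0 : Int)).toNat = 0 by omega,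
    show ((input_string.toList.length : Int) - 1).toNat = input_string.toList.length - 1 by omega]
  rw [Bool.eq_iff_iff, PySem.Set.contains_iff, PySem.Set.contains_iff]
  rw [hcell]
  rw [show (((input_string.toList.length - 1 : Nat)) : Int) =
    (input_string.toList.length : Int) - 1 by omega]
  norm_num
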